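-- pv_equiv track=rewrite | github.com/Tarantor/Research-and-implementation-of-binary-protocol-reverse-engineering-based-on-traffic-behavior | master_paper/chapter3/utility.py | get_bound_candidate
-- ===== SOURCE A (Python) =====
-- def get_bound_candidate(filter_ngram_loction_count: dict):
--     bound_candidate = set()  # 所有候选边界混在一起
--     ngram_loction_category_by_n = {}  # 按n分类的候选边界
--     for value in filter_ngram_loction_count.items():
--         bound_candidate.add((value[0][1], value[0][1] + len(value[0][0]) - 1))
--         if len(value[0][0]) not in ngram_loction_category_by_n:
--             ngram_loction_category_by_n[len(value[0][0])] = set()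
--         ngram_loction_category_by_n[len(value[0][0])].add((value[0][1], value[0][1] + len(value[0][0]) - 1))
--     return (bound_candidate, ngram_loction_category_by_n)
-- ===== SOURCE B (Python) =====
-- def get_bound_candidate(filter_ngram_loction_count: dict):
--     keys = list(filter_ngram_loction_count)
--     lengths = list(dict.fromkeys(len(s) for s, _ in keys))
--     ngram_loction_category_by_n = {
--         n: {(loc, loc + len(s) - 1) for s, loc in keys if len(s) == n}
--         for n in lengths
--     }
--     bound_candidate = {(loc, loc + len(s) - 1) for s, loc in keys}
--     return (bound_candidate, ngram_loction_category_by_n)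
-- ===== Notes on version B (the rewrite author's own statement) =====
-- stated objective: alternative
-- what changed: Replaces A's single loop that mutates two parallel accumulators (a flat set and a dict of sets built with membership-test-then-insert) by a declarative group-by-selection: the distinct lengths are computed once with dict.fromkeys, the grouped dict is a dict comprehension selecting each length's boundaries by a filter, and the flat set is a separate set comprehension.
import Mathlib
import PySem

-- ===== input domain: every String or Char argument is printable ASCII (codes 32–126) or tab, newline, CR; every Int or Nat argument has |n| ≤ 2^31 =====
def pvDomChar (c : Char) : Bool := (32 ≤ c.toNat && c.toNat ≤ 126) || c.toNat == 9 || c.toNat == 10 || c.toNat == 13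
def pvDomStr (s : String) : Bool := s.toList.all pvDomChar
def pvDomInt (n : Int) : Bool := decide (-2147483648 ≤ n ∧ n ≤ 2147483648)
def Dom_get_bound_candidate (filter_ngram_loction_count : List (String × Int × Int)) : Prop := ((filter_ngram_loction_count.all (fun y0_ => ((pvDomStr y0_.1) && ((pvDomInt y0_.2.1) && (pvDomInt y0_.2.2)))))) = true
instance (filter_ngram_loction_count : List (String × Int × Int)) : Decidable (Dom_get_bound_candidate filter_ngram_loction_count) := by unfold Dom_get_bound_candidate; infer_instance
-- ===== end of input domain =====

-- ===== PORT A =====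
-- One honest line: B replaces A's single two-accumulator mutation loop by a declarative
-- group-by-selection (distinct lengths once, then per-length filter comprehensions); alternative, not faster.
-- Loop body of A (one iteration of 'for value in ...items()'):
def gbc_step (st : PySem.Set (Int × Int) × PySem.Dict Int (PySem.Set (Int × Int)))
    (value : String × Int × Int) : PySem.Set (Int × Int) × PySem.Dict Int (PySem.Set (Int × Int)) :=
  let bc := PySem.Set.add st.1 (value.2.1, value.2.1 + PySem.Str.len value.1 - 1)
  let d := if st.2.contains (PySem.Str.len value.1) then st.2
           else st.2.insert (PySem.Str.len value.1) PySem.Set.empty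
  (bc, d.modify (PySem.Str.len value.1) PySem.Set.empty
        (fun s => PySem.Set.add s (value.2.1, value.2.1 + PySem.Str.len value.1 - 1)))

def get_bound_candidate (filter_ngram_loction_count : List (String × Int × Int)) : (List (Int × Int)) × (List (Int × List (Int × Int))) :=
  let res := filter_ngram_loction_count.foldl gbc_step (PySem.Set.empty, PySem.Dict.mk [])
  (res.1, res.2.items)

-- ===== PORT B =====
def pvLen (v : String × Int × Int) : Int := PySem.Str.len v.1

def pvBound (v : String × Int × Int) : Int × Int := (v.2.1, v.2.1 + PySem.Str.len v.1 - 1)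

def get_bound_candidate_alt (filter_ngram_loction_count : List (String × Int × Int)) : (List (Int × Int)) × (List (Int × List (Int × Int))) :=
  let lengths := PySem.List.dedup (filter_ngram_loction_count.map pvLen)
  let grouped := lengths.map (fun n => (n,
      PySem.Set.ofList ((filter_ngram_loction_count.filter (fun v => pvLen v == n)).map pvBound)))
  (PySem.Set.ofList (filter_ngram_loction_count.map pvBound), grouped)

-- ===== PRECONDITION & SPEC =====
def Spec_get_bound_candidate (filter_ngram_loction_count : List (String × Int × Int)) (out : (List (Int × Int)) × (List (Int × List (Int × Int)))) : Prop := out = get_bound_candidate_alt filter_ngram_loction_count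
instance (filter_ngram_loction_count : List (String × Int × Int)) (out : (List (Int × Int)) × (List (Int × List (Int × Int)))) : Decidable (Spec_get_bound_candidate filter_ngram_loction_count out) := by unfold Spec_get_bound_candidate; infer_instance

-- ===== CLAIM (what is proved, stated in full; the proofs are below) =====
def Claim_equal_get_bound_candidate : Prop := ∀ (filter_ngram_loction_count : List (String × Int × Int)), Dom_get_bound_candidate filter_ngram_loction_count → Spec_get_bound_candidate filter_ngram_loction_count (get_bound_candidate filter_ngram_loction_count)

-- ===== LEMMAS AND PROOFS =====

-- canonical state of A's loop after having processed the prefix `pre`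
def gbcState (pre : List (String × Int × Int)) :
    PySem.Set (Int × Int) × PySem.Dict Int (PySem.Set (Int × Int)) :=
  (PySem.Set.ofList (pre.map pvBound),
   PySem.Dict.mk ((PySem.List.dedup (pre.map pvLen)).map (fun n => (n,
     PySem.Set.ofList ((pre.filter (fun v => pvLen v == n)).map pvBound)))))

theorem ofList_snoc {α : Type} [BEq α] (xs : List α) (y : α) :
    PySem.Set.ofList (xs ++ [y]) = PySem.Set.add (PySem.Set.ofList xs) y := by
  simp [PySem.Set.ofList, List.foldl_append]

theorem find?_map_key {β : Type} (ks : List Int) (G : Int → β) (n : Int) (h : n ∈ ks) :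
    List.find? (fun p => p.1 == n) (ks.map (fun m => (m, G m))) = some (n, G n) := by
  induction ks with
  | nil => cases h
  | cons m ks ih =>
    by_cases hm : m = n
    · subst hm; simp
    · have : n ∈ ks := by
        rcases List.mem_cons.mp h with h1 | h1
        · exact absurd h1.symm hm
        · exact h1
      simp [hm, ih this]

theorem find?_map_key_none {β : Type} (ks : List Int) (G : Int → β) (n : Int) (h : n ∉ ks) :
    List.find? (fun p => p.1 == n) (ks.map (fun m => (m, G m))) = none := by
  rw [List.find?_eq_none]
  rintro p hp
  rcases List.mem_map.mp hp with ⟨m, hm, rfl⟩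
  intro e
  exact h (beq_iff_eq.mp e ▸ hm)

theorem contains_mkmap {β : Type} (ks : List Int) (G : Int → β) (n : Int) :
    (PySem.Dict.mk (ks.map (fun m => (m, G m)))).contains n = true ↔ n ∈ ks := by
  simp [PySem.Dict.contains, List.any_map, Function.comp, beq_iff_eq]

theorem getD_mkmap {β : Type} (ks : List Int) (G : Int → β) (n : Int) (d : β) (h : n ∈ ks) :
    (PySem.Dict.mk (ks.map (fun m => (m, G m)))).getD n d = G n := by
  simp [PySem.Dict.getD, PySem.Dict.get?, find?_map_key ks G n h]

theorem insert_mkmap_mem {β : Type} (ks : List Int) (G : Int → β) (n : Int) (v : β) (h : n ∈ ks) :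
    (PySem.Dict.mk (ks.map (fun m => (m, G m)))).insert n v
      = PySem.Dict.mk (ks.map (fun m => (m, if m = n then v else G m))) := by
  rw [PySem.Dict.insert, if_pos ((contains_mkmap ks G n).mpr h)]
  simp only [PySem.Dict.mk.injEq, List.map_map]
  apply List.map_congr_left
  intro m _
  by_cases hm : m = n
  · subst hm; simp
  · simp [hm]

theorem gbc_step_state (pre : List (String × Int × Int)) (x : String × Int × Int) :
    gbc_step (gbcState pre) x = gbcState (pre ++ [x]) := by
  have hpl : PySem.Str.len x.1 = pvLen x := rfl
  have hGm : ∀ m : Int, pvLen x ≠ m →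
      PySem.Set.ofList (((pre ++ [x]).filter (fun v => pvLen v == m)).map pvBound)
        = PySem.Set.ofList ((pre.filter (fun v => pvLen v == m)).map pvBound) := by
    intro m hm
    have hx : (pvLen x == m) = false := beq_eq_false_iff_ne.mpr hm
    simp [List.filter_append, List.filter, hx]
  have hGn :
      PySem.Set.ofList (((pre ++ [x]).filter (fun v => pvLen v == pvLen x)).map pvBound)
        = PySem.Set.add (PySem.Set.ofList ((pre.filter (fun v => pvLen v == pvLen x)).map pvBound)) (pvBound x) := by
    simp [List.filter_append, List.filter, List.map_append, ofList_snoc]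
  have hded : PySem.List.dedup ((pre ++ [x]).map pvLen)
      = PySem.Set.add (PySem.List.dedup (pre.map pvLen)) (pvLen x) := by
    simp [PySem.List.dedup, List.map_append, ofList_snoc]
  by_cases hmem : pvLen x ∈ PySem.List.dedup (pre.map pvLen)
  · -- length already grouped: dict keys unchanged, the group of that length gains the boundary
    have hadd : PySem.Set.add (PySem.List.dedup (pre.map pvLen)) (pvLen x)
        = PySem.List.dedup (pre.map pvLen) := by
      rw [PySem.Set.add, if_pos]
      simpa [List.elem_iff] using hmem
    simp only [gbc_step, gbcState, hpl]
    rw [if_pos ((contains_mkmap _ _ _).mpr hmem)]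
    rw [Prod.mk.injEq]
    refine ⟨?_, ?_⟩
    · simp [pvBound, pvLen, PySem.Str.len, List.map_append, ofList_snoc]
    · rw [PySem.Dict.modify, getD_mkmap _ _ _ _ hmem, insert_mkmap_mem _ _ _ _ hmem]
      simp only [hded, hadd, PySem.Dict.mk.injEq]
      apply List.map_congr_left
      intro m hmks
      by_cases hm : m = pvLen x
      · subst hm
        simp [List.filter_append, List.filter, List.map_append, ofList_snoc,
          pvBound, pvLen, PySem.Str.len]
      · have hx : (pvLen x == m) = false := beq_eq_false_iff_ne.mpr (fun e => hm e.symm)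
        simp [hm, hx, List.filter_append, List.filter]
  · -- fresh length: a new singleton group is appended at the end
    have hnotin : pvLen x ∉ pre.map pvLen := by
      simpa [PySem.List.dedup, PySem.Set.mem_ofList] using hmem
    have hadd : PySem.Set.add (PySem.List.dedup (pre.map pvLen)) (pvLen x)
        = PySem.List.dedup (pre.map pvLen) ++ [pvLen x] := by
      rw [PySem.Set.add, if_neg]
      simpa [List.elem_iff] using hmem
    have hcontF : (PySem.Dict.mk ((PySem.List.dedup (pre.map pvLen)).map (fun n => (n,
        PySem.Set.ofList ((pre.filter (fun v => pvLen v == n)).map pvBound))))).contains (pvLen x) = false := by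
      rw [Bool.eq_false_iff]
      intro hc
      exact hmem ((contains_mkmap _ _ _).mp hc)
    have hfresh : ∀ m ∈ PySem.List.dedup (pre.map pvLen), (m == pvLen x) = false := by
      intro m hm
      rw [beq_eq_false_iff_ne]
      intro e; exact hmem (e ▸ hm)
    have hfilnil : pre.filter (fun v => pvLen v == pvLen x) = [] := by
      rw [List.filter_eq_nil_iff]
      intro v hv
      simp only [beq_iff_eq]
      intro e
      exact hnotin (e ▸ List.mem_map_of_mem hv)
    simp only [gbc_step, gbcState, hpl]
    rw [if_neg (by rw [hcontF]; simp)]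
    rw [Prod.mk.injEq]
    refine ⟨?_, ?_⟩
    · simp [pvBound, pvLen, PySem.Str.len, List.map_append, ofList_snoc]
    · rw [PySem.Dict.insert, if_neg (by rw [hcontF]; simp)]
      rw [PySem.Dict.modify]
      have hgetD : (PySem.Dict.mk ((PySem.List.dedup (pre.map pvLen)).map (fun n => (n,
          PySem.Set.ofList ((pre.filter (fun v => pvLen v == n)).map pvBound))) ++ [(pvLen x, PySem.Set.empty)])).getD
          (pvLen x) PySem.Set.empty = PySem.Set.empty := by
        simp only [PySem.Dict.getD, PySem.Dict.get?, List.find?_append,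
          find?_map_key_none _ _ _ hmem]
        simp
      rw [hgetD]
      have hcontT : (PySem.Dict.mk ((PySem.List.dedup (pre.map pvLen)).map (fun n => (n,
          PySem.Set.ofList ((pre.filter (fun v => pvLen v == n)).map pvBound))) ++ [(pvLen x, PySem.Set.empty)])).contains
          (pvLen x) = true := by
        simp [PySem.Dict.contains, List.any_append]
      rw [PySem.Dict.insert, if_pos hcontT]
      have hded2 : PySem.List.dedup (List.map pvLen pre ++ [pvLen x])
          = PySem.List.dedup (List.map pvLen pre) ++ [pvLen x] := by
        rw [show (PySem.List.dedup (List.map pvLen pre ++ [pvLen x]))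
            = PySem.Set.add (PySem.List.dedup (List.map pvLen pre)) (pvLen x) from
          ofList_snoc _ _, hadd]
      simp only [PySem.Dict.mk.injEq, List.map_append, List.map_map, List.map_cons, List.map_nil]
      rw [hded2]
      simp only [List.map_append]
      congr 1
      · apply List.map_congr_left
        intro m hm
        have hne : pvLen x ≠ m := by
          intro e; exact hmem (e ▸ hm)
        have hxm : (pvLen x == m) = false := beq_eq_false_iff_ne.mpr hne
        simp [hfresh m hm, Function.comp, List.filter, hxm]
      · simp only [List.map_cons, List.map_nil]
        rw [List.filter_append, hfilnil]
        simp [List.filter, PySem.Set.ofList, PySem.Set.add, PySem.Set.empty,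
          pvBound, pvLen, PySem.Str.len]

theorem gbc_foldl (l pre : List (String × Int × Int)) :
    l.foldl gbc_step (gbcState pre) = gbcState (pre ++ l) := by
  induction l generalizing pre with
  | nil => simp
  | cons x l ih =>
    rw [List.foldl_cons, gbc_step_state, ih]
    simp

-- ===== VERDICT (by name: the statement is the Claim_ definition above) =====
theorem get_bound_candidate_spec : Claim_equal_get_bound_candidate := by
  intro l _
  show get_bound_candidate l = get_bound_candidate_alt l
  have h0 : ((PySem.Set.empty, PySem.Dict.mk []) :
      PySem.Set (Int × Int) × PySem.Dict Int (PySem.Set (Int × Int))) = gbcState [] := rfl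
  simp only [get_bound_candidate, h0, gbc_foldl, List.nil_append]
  rfl
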